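-- pv_equiv track=rewrite | github.com/student079/Algorithm | 백준/Platinum/23291. 어항 정리/어항 정리.py | adjustFish
-- ===== SOURCE A (Python) =====
-- dx = (0 ,1, 0, -1)
--
-- dy = (1, 0, -1, 0)
--
-- def adjustFish(board):
--     h = len(board)
--     newBoard = []
--     visited = []
--     for i in range(h):
--         newBoard.append(board[i][:])
--         visited.append([False] * len(board[i]))
--
--     for i in range(h):
--         w = len(board[i])
--         for j in range(w):
--             visited[i][j] = True
--
--             for k in range(4):
--                 ni = i + dx[k]
--                 nj = j + dy[k]
--
--                 if not (0 <= ni < h):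
--                     continue
--
--                 if not ( 0 <= nj < len(board[ni])):
--                     continue
--
--                 d = abs(board[ni][nj] - board[i][j]) // 5
--                 if not visited[ni][nj] and d > 0:
--                     if board[ni][nj] - board[i][j] > 0:
--                         newBoard[ni][nj] -= d
--                         newBoard[i][j] += d
--                     else:
--                         newBoard[ni][nj] += d
--                         newBoard[i][j] -= d
--
--     return newBoard
-- ===== SOURCE B (Python) =====
-- def adjustFish(board):
--     newBoard = [row[:] for row in board]
--
--     def move(i1, j1, i2, j2):
--         a = board[i1][j1]
--         b = board[i2][j2]
--         d = abs(b - a) // 5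
--         if b > a:
--             newBoard[i1][j1] += d
--             newBoard[i2][j2] -= d
--         elif a > b:
--             newBoard[i1][j1] -= d
--             newBoard[i2][j2] += d
--
--     for i in range(len(board)):
--         for j in range(len(board[i]) - 1):
--             move(i, j, i, j + 1)
--     for i in range(len(board) - 1):
--         for j in range(min(len(board[i]), len(board[i + 1]))):
--             move(i, j, i + 1, j)
--     return newBoard
-- ===== Notes on version B (the rewrite author's own statement) =====
-- stated objective: simpler
-- what changed: B drops A's visited matrix and per-cell 4-neighbour scan and instead settles each adjacent pair exactly once in two direction passes (horizontal, then vertical) over the unchanged board, writing additive transfers into a copy; order does not matter because all deltas are read from the original board.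
import Mathlib
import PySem

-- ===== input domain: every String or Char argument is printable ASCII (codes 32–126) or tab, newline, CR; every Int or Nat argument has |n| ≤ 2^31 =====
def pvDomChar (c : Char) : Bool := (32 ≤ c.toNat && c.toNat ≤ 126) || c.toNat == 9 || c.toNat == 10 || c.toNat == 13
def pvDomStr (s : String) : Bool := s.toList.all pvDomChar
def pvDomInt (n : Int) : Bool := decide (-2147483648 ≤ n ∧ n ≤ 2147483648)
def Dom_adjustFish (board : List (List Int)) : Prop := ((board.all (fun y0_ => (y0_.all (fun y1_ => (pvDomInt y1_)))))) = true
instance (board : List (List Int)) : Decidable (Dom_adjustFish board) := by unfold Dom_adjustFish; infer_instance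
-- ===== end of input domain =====

-- B replaces A's visited array and 4-neighbour scan by two direction passes over the
-- original board (each adjacent pair settled exactly once); objective: simpler.

-- ===== PORT A =====
-- dx/dy direction tables of the Python module
def pvDx (k : Nat) : Int := ([0, 1, 0, -1] : List Int).getD k 0
def pvDy (k : Nat) : Int := ([1, 0, -1, 0] : List Int).getD k 0
def pvVal (board : List (List Int)) (i j : Int) : Int :=
  (board.getD i.toNat []).getD j.toNat 0
def pvRowLen (board : List (List Int)) (i : Int) : Nat := (board.getD i.toNat []).length
def pvVisGet (vis : List (List Bool)) (i j : Int) : Bool :=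
  (vis.getD i.toNat []).getD j.toNat false
def pvAdd2 (nb : List (List Int)) (i j : Nat) (v : Int) : List (List Int) :=
  nb.modify i (fun row => row.modify j (fun x => x + v))
def pvKStep (board : List (List Int)) (vis : List (List Bool)) (i j : Nat)
    (nb : List (List Int)) (k : Nat) : List (List Int) :=
  let h := board.length
  let ni : Int := (i : Int) + pvDx k
  let nj : Int := (j : Int) + pvDy k
  if ¬ (0 ≤ ni ∧ ni < (h : Int)) then nb
  else if ¬ (0 ≤ nj ∧ nj < (pvRowLen board ni : Int)) then nb
  else
    let d := PySem.Int.floordiv |pvVal board ni nj - pvVal board (i : Int) (j : Int)| 5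
    if ¬ pvVisGet vis ni nj = true ∧ d > 0 then
      if pvVal board ni nj - pvVal board (i : Int) (j : Int) > 0 then
        pvAdd2 (pvAdd2 nb ni.toNat nj.toNat (-d)) i j d
      else
        pvAdd2 (pvAdd2 nb ni.toNat nj.toNat d) i j (-d)
    else nb

def pvCellA (board : List (List Int)) (st : List (List Int) × List (List Bool))
    (i j : Nat) : List (List Int) × List (List Bool) :=
  let vis := st.2.modify i (fun row => row.set j true)
  ((List.range 4).foldl (pvKStep board vis i j) st.1, vis)

def adjustFish (board : List (List Int)) : List (List Int) :=
  let h := board.length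
  let init := (List.range h).foldl (fun (st : List (List Int) × List (List Bool)) i =>
    (st.1 ++ [board.getD i []], st.2 ++ [List.replicate (board.getD i []).length false]))
    ([], [])
  let fin := (List.range h).foldl (fun st i =>
    (List.range (board.getD i []).length).foldl (fun st j => pvCellA board st i j) st) init
  fin.1

-- ===== PORT B =====
-- helper move(i1, j1, i2, j2) of Source B: settle one adjacent pair, reading board, writing nb
def pvMove (board nb : List (List Int)) (i1 j1 i2 j2 : Nat) : List (List Int) :=
  let a := (board.getD i1 []).getD j1 0
  let b := (board.getD i2 []).getD j2 0
  let d := PySem.Int.floordiv |b - a| 5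
  if b > a then pvAdd2 (pvAdd2 nb i1 j1 d) i2 j2 (-d)
  else if a > b then pvAdd2 (pvAdd2 nb i1 j1 (-d)) i2 j2 d
  else nb

def adjustFish_alt (board : List (List Int)) : List (List Int) :=
  let nb := board.map (fun row => row)
  let nb := (List.range board.length).foldl (fun nb i =>
    (List.range ((board.getD i []).length - 1)).foldl (fun nb j =>
      pvMove board nb i j i (j + 1)) nb) nb
  let nb := (List.range (board.length - 1)).foldl (fun nb i =>
    (List.range (min (board.getD i []).length (board.getD (i + 1) []).length)).foldl
      (fun nb j => pvMove board nb i j (i + 1) j) nb) nb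
  nb

-- ===== PRECONDITION & SPEC =====
def Spec_adjustFish (board : List (List Int)) (out : List (List Int)) : Prop := out = adjustFish_alt board
instance (board : List (List Int)) (out : List (List Int)) : Decidable (Spec_adjustFish board out) := by unfold Spec_adjustFish; infer_instance

-- ===== CLAIM (what is proved, stated in full; the proofs are below) =====
def Claim_equal_adjustFish : Prop := ∀ (board : List (List Int)), Dom_adjustFish board → Spec_adjustFish board (adjustFish board)

-- ===== LEMMAS AND PROOFS =====
-- an adjacent pair to settle: (cell, neighbour); applying it adds a signed transfer
def pvApply (board : List (List Int)) (nb : List (List Int))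
    (e : (Nat × Nat) × (Nat × Nat)) : List (List Int) :=
  pvMove board nb e.1.1 e.1.2 e.2.1 e.2.2
def pvCellEvents (board : List (List Int)) (i j : Nat) : List ((Nat × Nat) × (Nat × Nat)) :=
  (if j + 1 < (board.getD i []).length then [((i, j), (i, j + 1))] else []) ++
  (if i + 1 < board.length ∧ j < (board.getD (i + 1) []).length then [((i, j), (i + 1, j))] else [])

-- visited characterised: exactly the in-shape cells lex-before (i, j) are true
def pvVisLe (board : List (List Int)) (vis : List (List Bool)) (i j : Nat) : Prop :=
  vis.length = board.length ∧
  (∀ a, (vis.getD a []).length = (board.getD a []).length) ∧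
  (∀ a b, (vis.getD a []).getD b false =
    decide (b < (board.getD a []).length ∧ (a < i ∨ (a = i ∧ b < j))))

lemma pvAdd2_zero (nb : List (List Int)) (i j : Nat) : pvAdd2 nb i j 0 = nb := by
  unfold pvAdd2
  apply List.ext_getElem?
  intro n
  simp [List.getElem?_modify]
  cases hx : nb[n]? with
  | none => simp
  | some r => simp; intro _; exact List.modify_id j r

lemma modify_add_comm (l : List Int) (j j' : Nat) (v w : Int) :
    (l.modify j (fun x => x + v)).modify j' (fun x => x + w)
      = (l.modify j' (fun x => x + w)).modify j (fun x => x + v) := by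
  apply List.ext_getElem?
  intro n
  simp [List.getElem?_modify]
  cases l[n]? <;> split_ifs <;> simp <;> ring

lemma pvAdd2_comm (nb : List (List Int)) (i j i' j' : Nat) (v w : Int) :
    pvAdd2 (pvAdd2 nb i j v) i' j' w = pvAdd2 (pvAdd2 nb i' j' w) i j v := by
  unfold pvAdd2
  apply List.ext_getElem?
  intro n
  simp [List.getElem?_modify]
  cases nb[n]? <;> split_ifs <;> simp [modify_add_comm]



lemma getD_modify (vis : List (List Bool)) (i a : Nat) (f : List Bool → List Bool) :
    (vis.modify i f).getD a [] =
      if i = a ∧ i < vis.length then f (vis.getD a []) else vis.getD a [] := by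
  rw [List.getD_eq_getElem?_getD, List.getD_eq_getElem?_getD, List.getElem?_modify]
  by_cases hia : i = a
  · subst hia
    by_cases hlt : i < vis.length
    · rw [if_pos ⟨rfl, hlt⟩]
      have hr : vis[i]? = some vis[i] := List.getElem?_eq_some_iff.mpr ⟨hlt, rfl⟩
      rw [hr]
      simp
    · rw [if_neg (by tauto)]
      have : vis[i]? = none := List.getElem?_eq_none_iff.mpr (by omega)
      rw [this]; simp
  · rw [if_neg (by tauto)]
    simp [hia]

lemma getD_set (row : List Bool) (j b : Nat) :
    (row.set j true).getD b false =
      if j = b ∧ j < row.length then true else row.getD b false := by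
  rw [List.getD_eq_getElem?_getD, List.getD_eq_getElem?_getD, List.getElem?_set]
  by_cases hjb : j = b
  · subst hjb
    by_cases hlt : j < row.length
    · rw [if_pos rfl, if_pos hlt, if_pos ⟨rfl, hlt⟩]; simp
    · rw [if_pos rfl, if_neg hlt, if_neg (by tauto)]
      have : row[j]? = none := List.getElem?_eq_none_iff.mpr (by omega)
      rw [this]
  · rw [if_neg hjb, if_neg (by tauto)]

lemma visle_set (board : List (List Int)) (vis : List (List Bool)) (i j : Nat)
    (hi : i < board.length) (hj : j < (board.getD i []).length)
    (h : pvVisLe board vis i j) :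
    pvVisLe board (vis.modify i (fun r => r.set j true)) i (j + 1) := by
  obtain ⟨hlen, hrow, hget⟩ := h
  refine ⟨by simp [hlen], ?_, ?_⟩
  · intro a
    rw [getD_modify]
    split_ifs with hc
    · obtain ⟨rfl, _⟩ := hc
      rw [List.length_set]; exact hrow i
    · exact hrow a
  · intro a b
    rw [getD_modify]
    split_ifs with hc
    · obtain ⟨rfl, _⟩ := hc
      rw [getD_set, hget]
      simp only [hrow]
      split_ifs with hc2
      · obtain ⟨rfl, h2⟩ := hc2
        symm; rw [decide_eq_true_iff]
        exact ⟨h2, Or.inr ⟨by trivial, by omega⟩⟩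
      · simp only [decide_eq_decide, lt_irrefl, false_or, true_and]
        constructor <;> rintro ⟨h1, h2⟩ <;> exact ⟨h1, by omega⟩
    · rw [hget]
      have hia : ¬ (i = a) := by
        intro he; exact hc ⟨he, by omega⟩
      simp only [decide_eq_decide]; omega

lemma d_nonneg (x : Int) : 0 ≤ PySem.Int.floordiv |x| 5 :=
  Int.fdiv_nonneg (abs_nonneg _) (by norm_num)

lemma aStep_eq_move (board nb : List (List Int)) (i1 j1 i2 j2 : Nat) :
    (if (¬ false = true ∧ PySem.Int.floordiv |(board.getD i2 []).getD j2 0 - (board.getD i1 []).getD j1 0| 5 > 0) then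
      (if (board.getD i2 []).getD j2 0 - (board.getD i1 []).getD j1 0 > 0 then
        pvAdd2 (pvAdd2 nb i2 j2 (-(PySem.Int.floordiv |(board.getD i2 []).getD j2 0 - (board.getD i1 []).getD j1 0| 5))) i1 j1 (PySem.Int.floordiv |(board.getD i2 []).getD j2 0 - (board.getD i1 []).getD j1 0| 5)
      else
        pvAdd2 (pvAdd2 nb i2 j2 (PySem.Int.floordiv |(board.getD i2 []).getD j2 0 - (board.getD i1 []).getD j1 0| 5)) i1 j1 (-(PySem.Int.floordiv |(board.getD i2 []).getD j2 0 - (board.getD i1 []).getD j1 0| 5)))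
    else nb)
    = pvMove board nb i1 j1 i2 j2 := by
  set a := (board.getD i1 []).getD j1 0 with ha
  set b := (board.getD i2 []).getD j2 0 with hb
  set d := PySem.Int.floordiv |b - a| 5 with hd
  have hdn : 0 ≤ d := d_nonneg _
  have hM : pvMove board nb i1 j1 i2 j2 =
      if b > a then pvAdd2 (pvAdd2 nb i1 j1 d) i2 j2 (-d)
      else if a > b then pvAdd2 (pvAdd2 nb i1 j1 (-d)) i2 j2 d else nb := rfl
  rw [hM]
  by_cases hpos : d > 0
  · have hne : b ≠ a := by
      intro he
      rw [he] at hd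
      simp [PySem.Int.floordiv] at hd
      omega
    by_cases hba : b - a > 0
    · rw [if_pos ⟨by simp, hpos⟩, if_pos hba, if_pos (by omega)]
      exact pvAdd2_comm nb i2 j2 i1 j1 (-d) d
    · rw [if_pos ⟨by simp, hpos⟩, if_neg hba, if_neg (by omega), if_pos (by
        rcases lt_or_gt_of_ne hne with h | h
        · exact h
        · omega)]
      exact pvAdd2_comm nb i2 j2 i1 j1 d (-d)
  · have hd0 : d = 0 := by omega
    rw [if_neg (by tauto)]
    rw [hd0]
    simp [pvAdd2_zero]

lemma toNat_cast (i : Nat) : ((i : Int)).toNat = i := by omega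
lemma toNat_cast_add_one (j : Nat) : ((j : Int) + 1).toNat = j + 1 := by omega

lemma kstep0 (board : List (List Int)) (vis : List (List Bool)) (i j : Nat)
    (nb : List (List Int)) (hi : i < board.length)
    (hget : ∀ a b, (vis.getD a []).getD b false =
      decide (b < (board.getD a []).length ∧ (a < i ∨ (a = i ∧ b < j + 1)))) :
    pvKStep board vis i j nb 0 =
      if j + 1 < (board.getD i []).length then pvMove board nb i j i (j + 1) else nb := by
  simp only [pvKStep, show pvDx 0 = 0 from rfl, show pvDy 0 = 1 from rfl, add_zero]
  rw [if_neg (not_not_intro ⟨Int.natCast_nonneg i, by exact_mod_cast hi⟩)]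
  have hrl : pvRowLen board (i : Int) = (board.getD i []).length := by
    simp [pvRowLen, toNat_cast]
  rw [hrl]
  by_cases hc : j + 1 < (board.getD i []).length
  · rw [if_neg (not_not_intro ⟨by omega, by push_cast; omega⟩), if_pos hc]
    have hvg : pvVisGet vis (i : Int) ((j : Int) + 1) = false := by
      simp only [pvVisGet, toNat_cast, toNat_cast_add_one, hget]
      simp only [decide_eq_false_iff_not]
      omega
    have hval1 : pvVal board (i : Int) ((j : Int) + 1) = (board.getD i []).getD (j + 1) 0 := by
      simp [pvVal, toNat_cast, toNat_cast_add_one]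
    have hval0 : pvVal board (i : Int) (j : Int) = (board.getD i []).getD j 0 := by
      simp [pvVal, toNat_cast]
    rw [hvg, hval1, hval0, toNat_cast, toNat_cast_add_one]
    exact aStep_eq_move board nb i j i (j + 1)
  · rw [if_pos (by push_neg; intro _; push_cast; omega), if_neg hc]

lemma kstep1 (board : List (List Int)) (vis : List (List Bool)) (i j : Nat)
    (nb : List (List Int)) (hi : i < board.length)
    (hget : ∀ a b, (vis.getD a []).getD b false =
      decide (b < (board.getD a []).length ∧ (a < i ∨ (a = i ∧ b < j + 1)))) :
    pvKStep board vis i j nb 1 =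
      if i + 1 < board.length ∧ j < (board.getD (i + 1) []).length then
        pvMove board nb i j (i + 1) j else nb := by
  simp only [pvKStep, show pvDx 1 = 1 from rfl, show pvDy 1 = 0 from rfl, add_zero]
  by_cases hc1 : i + 1 < board.length
  · rw [if_neg (not_not_intro ⟨by omega, by push_cast; omega⟩)]
    have hrl : pvRowLen board ((i : Int) + 1) = (board.getD (i + 1) []).length := by
      simp [pvRowLen, toNat_cast_add_one]
    rw [hrl]
    by_cases hc2 : j < (board.getD (i + 1) []).length
    · rw [if_neg (not_not_intro ⟨Int.natCast_nonneg j, by exact_mod_cast hc2⟩)]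
      conv_rhs => rw [if_pos ⟨hc1, hc2⟩]
      have hvg : pvVisGet vis ((i : Int) + 1) (j : Int) = false := by
        simp only [pvVisGet, toNat_cast, toNat_cast_add_one, hget]
        simp only [decide_eq_false_iff_not]
        omega
      have hval1 : pvVal board ((i : Int) + 1) (j : Int) = (board.getD (i + 1) []).getD j 0 := by
        simp [pvVal, toNat_cast, toNat_cast_add_one]
      have hval0 : pvVal board (i : Int) (j : Int) = (board.getD i []).getD j 0 := by
        simp [pvVal, toNat_cast]
      rw [hvg, hval1, hval0, toNat_cast, toNat_cast_add_one]
      exact aStep_eq_move board nb i j (i + 1) j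
    · rw [if_pos (by push_neg; intro _; push_cast; omega), if_neg (by tauto)]
  · rw [if_pos (by push_neg; intro _; push_cast; omega), if_neg (by tauto)]

lemma kstep2 (board : List (List Int)) (vis : List (List Bool)) (i j : Nat)
    (nb : List (List Int)) (hi : i < board.length) (hj : j < (board.getD i []).length)
    (hget : ∀ a b, (vis.getD a []).getD b false =
      decide (b < (board.getD a []).length ∧ (a < i ∨ (a = i ∧ b < j + 1)))) :
    pvKStep board vis i j nb 2 = nb := by
  simp only [pvKStep, show pvDx 2 = 0 from rfl, show pvDy 2 = -1 from rfl, add_zero]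
  rw [if_neg (not_not_intro ⟨Int.natCast_nonneg i, by exact_mod_cast hi⟩)]
  by_cases hc : 1 ≤ j
  · have hrl : pvRowLen board (i : Int) = (board.getD i []).length := by
      simp [pvRowLen, toNat_cast]
    simp only [hrl]
    rw [if_neg (not_not_intro ⟨by omega, by push_cast; omega⟩)]
    have hvg : pvVisGet vis (i : Int) ((j : Int) + (-1)) = true := by
      have ht : ((j : Int) + (-1)).toNat = j - 1 := by omega
      simp only [pvVisGet, toNat_cast, ht, hget]
      simp only [decide_eq_true_iff]
      exact ⟨by omega, Or.inr ⟨by trivial, by omega⟩⟩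
    rw [hvg]
    rw [if_neg (by simp)]
  · rw [if_pos (by push_neg; intro h; omega)]

lemma kstep3 (board : List (List Int)) (vis : List (List Bool)) (i j : Nat)
    (nb : List (List Int)) (hi : i < board.length)
    (hget : ∀ a b, (vis.getD a []).getD b false =
      decide (b < (board.getD a []).length ∧ (a < i ∨ (a = i ∧ b < j + 1)))) :
    pvKStep board vis i j nb 3 = nb := by
  simp only [pvKStep, show pvDx 3 = -1 from rfl, show pvDy 3 = 0 from rfl, add_zero]
  by_cases hc : 1 ≤ i
  · rw [if_neg (not_not_intro ⟨by omega, by push_cast; omega⟩)]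
    have ht : ((i : Int) + (-1)).toNat = i - 1 := by omega
    have hrl : pvRowLen board ((i : Int) + (-1)) = (board.getD (i - 1) []).length := by
      simp [pvRowLen, ht]
    rw [hrl]
    by_cases hc2 : j < (board.getD (i - 1) []).length
    · rw [if_neg (not_not_intro ⟨Int.natCast_nonneg j, by exact_mod_cast hc2⟩)]
      have hvg : pvVisGet vis ((i : Int) + (-1)) (j : Int) = true := by
        simp only [pvVisGet, toNat_cast, ht, hget]
        simp only [decide_eq_true_iff]
        exact ⟨hc2, Or.inl (by omega)⟩
      rw [hvg]
      rw [if_neg (by simp)]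
    · rw [if_pos (by push_neg; intro _; push_cast; omega)]
  · rw [if_pos (by push_neg; intro h; omega)]

lemma cell_step (board : List (List Int)) (nb : List (List Int)) (vis : List (List Bool))
    (i j : Nat) (hi : i < board.length) (hj : j < (board.getD i []).length)
    (hvis : pvVisLe board vis i j) :
    pvCellA board (nb, vis) i j =
      ((pvCellEvents board i j).foldl (pvApply board) nb,
        vis.modify i (fun r => r.set j true)) := by
  obtain ⟨_, _, hget⟩ := visle_set board vis i j hi hj hvis
  show ((List.range 4).foldl (pvKStep board (vis.modify i fun r => r.set j true) i j) nb, _) = _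
  rw [show (List.range 4) = [0, 1, 2, 3] from rfl]
  simp only [List.foldl_cons, List.foldl_nil]
  rw [kstep0 board _ i j nb hi hget, kstep1 board _ i j _ hi hget,
    kstep2 board _ i j _ hi hj hget, kstep3 board _ i j _ hi hget]
  simp only [pvCellEvents]
  by_cases hH : j + 1 < (board.getD i []).length <;>
    by_cases hV : i + 1 < board.length ∧ j < (board.getD (i + 1) []).length <;>
    simp only [hH, hV, ite_true, ite_false, List.foldl_append, List.foldl_cons,
      List.foldl_nil] <;> rfl

lemma visle_roll (board : List (List Int)) (vis : List (List Bool)) (i : Nat)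
    (h : pvVisLe board vis i (board.getD i []).length) : pvVisLe board vis (i + 1) 0 := by
  refine ⟨h.1, h.2.1, fun a b => ?_⟩
  rw [h.2.2 a b]
  by_cases hai : a = i
  · subst hai
    simp only [decide_eq_decide]
    constructor
    · rintro ⟨h1, _⟩; exact ⟨h1, Or.inl (by omega)⟩
    · rintro ⟨h1, _⟩; exact ⟨h1, Or.inr ⟨by trivial, h1⟩⟩
  · simp only [decide_eq_decide]
    constructor <;> rintro ⟨h1, h2⟩ <;> refine ⟨h1, ?_⟩
    · rcases h2 with h2 | ⟨rfl, h3⟩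
      · exact Or.inl (by omega)
      · exact absurd rfl hai
    · rcases h2 with h2 | ⟨rfl, h3⟩
      · exact Or.inl (by omega)
      · omega

lemma getD_map_rows (board : List (List Int)) (a : Nat) :
    (List.map (fun r => List.replicate r.length false) board).getD a []
      = List.replicate (board.getD a []).length false := by
  rw [List.getD_eq_getElem?_getD, List.getElem?_map, List.getD_eq_getElem?_getD (l := board)]
  cases board[a]? <;> simp

lemma visle_init (board : List (List Int)) :
    pvVisLe board (board.map fun r => List.replicate r.length false) 0 0 := by
  refine ⟨by simp, fun a => ?_, fun a b => ?_⟩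
  · rw [getD_map_rows]
    simp
  · rw [getD_map_rows]
    rw [List.getD_eq_getElem?_getD, List.getElem?_replicate]
    split_ifs
    · simp only [Option.getD_some]
      symm
      rw [decide_eq_false_iff_not]
      rintro ⟨_, h | ⟨_, h⟩⟩ <;> omega
    · simp only [Option.getD_none]
      symm
      rw [decide_eq_false_iff_not]
      rintro ⟨_, h | ⟨_, h⟩⟩ <;> omega

lemma row_fold (board : List (List Int)) (i : Nat) (hi : i < board.length) :
    ∀ (cnt j0 : Nat) (nb : List (List Int)) (vis : List (List Bool)),
      j0 + cnt = (board.getD i []).length → pvVisLe board vis i j0 →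
      ∃ vis', (List.range' j0 cnt).foldl (fun st j => pvCellA board st i j) (nb, vis)
          = (((List.range' j0 cnt).flatMap (fun j => pvCellEvents board i j)).foldl
              (pvApply board) nb, vis')
        ∧ pvVisLe board vis' (i + 1) 0 := by
  intro cnt
  induction cnt with
  | zero =>
    intro j0 nb vis hlen hv
    refine ⟨vis, by simp, ?_⟩
    apply visle_roll
    have : j0 = (board.getD i []).length := by omega
    rwa [this] at hv
  | succ n ih =>
    intro j0 nb vis hlen hv
    rw [List.range'_succ]
    simp only [List.foldl_cons, List.flatMap_cons]
    rw [cell_step board nb vis i j0 hi (by omega) hv]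
    obtain ⟨vis', heq, hv'⟩ := ih (j0 + 1) ((pvCellEvents board i j0).foldl (pvApply board) nb)
      (vis.modify i fun r => r.set j0 true) (by omega)
      (visle_set board vis i j0 hi (by omega) hv)
    exact ⟨vis', by rw [heq, List.foldl_append], hv'⟩

lemma grid_fold (board : List (List Int)) :
    ∀ (cnt i0 : Nat) (nb : List (List Int)) (vis : List (List Bool)),
      i0 + cnt = board.length → pvVisLe board vis i0 0 →
      ∃ vis', (List.range' i0 cnt).foldl (fun st i =>
          (List.range (board.getD i []).length).foldl (fun st j => pvCellA board st i j) st)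
          (nb, vis)
        = (((List.range' i0 cnt).flatMap (fun i =>
            (List.range (board.getD i []).length).flatMap (fun j => pvCellEvents board i j))).foldl
            (pvApply board) nb, vis') := by
  intro cnt
  induction cnt with
  | zero => intro i0 nb vis _ _; exact ⟨vis, by simp⟩
  | succ n ih =>
    intro i0 nb vis hlen hv
    rw [List.range'_succ]
    simp only [List.foldl_cons, List.flatMap_cons]
    rw [List.range_eq_range']
    obtain ⟨vis1, heq1, hv1⟩ := row_fold board i0 (by omega) (board.getD i0 []).length 0 nb vis
      (by omega) hv
    rw [heq1]
    obtain ⟨vis2, heq2⟩ := ih (i0 + 1) _ vis1 (by omega) hv1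
    refine ⟨vis2, ?_⟩
    rw [heq2, List.foldl_append]

def pvHEvents (board : List (List Int)) : List ((Nat × Nat) × (Nat × Nat)) :=
  (List.range board.length).flatMap (fun i =>
    (List.range ((board.getD i []).length - 1)).map (fun j => ((i, j), (i, j + 1))))

def pvVEvents (board : List (List Int)) : List ((Nat × Nat) × (Nat × Nat)) :=
  (List.range (board.length - 1)).flatMap (fun i =>
    (List.range (min (board.getD i []).length (board.getD (i + 1) []).length)).map
      (fun j => ((i, j), (i + 1, j))))

lemma map_getD_range (l : List (List Int)) :
    (List.range l.length).map (fun i => l.getD i []) = l := by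
  induction l with
  | nil => rfl
  | cons x t ih =>
    rw [List.length_cons, List.range_succ_eq_map, List.map_cons, List.map_map]
    simp only [Function.comp_def, List.getD_cons_zero, List.getD_cons_succ]
    rw [ih]

lemma init_eq (board : List (List Int)) :
    (List.range board.length).foldl (fun (st : List (List Int) × List (List Bool)) i =>
      (st.1 ++ [board.getD i []], st.2 ++ [List.replicate (board.getD i []).length false]))
      ([], [])
    = (board, board.map fun r => List.replicate r.length false) := by
  rw [PySem.List.foldl_prod_mk (f := fun acc i => acc ++ [board.getD i []])
    (g := fun acc i => acc ++ [List.replicate (board.getD i []).length false])]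
  rw [PySem.List.foldl_append_singleton_eq_map, PySem.List.foldl_append_singleton_eq_map]
  simp only [List.nil_append, Prod.mk.injEq]
  constructor
  · exact map_getD_range board
  · rw [show (fun i => List.replicate (board.getD i []).length false)
        = (fun r => List.replicate (List.length r) false) ∘ (fun i => board.getD i []) from rfl,
      ← List.map_map, map_getD_range]

lemma foldl_flatMap_eq {α β γ : Type} (f : γ → β → γ) (g : α → List β) (l : List α) (init : γ) :
    (l.flatMap g).foldl f init = l.foldl (fun acc a => (g a).foldl f acc) init := by
  induction l generalizing init with
  | nil => rfl
  | cons a t ih => simp [List.flatMap_cons, List.foldl_append, ih]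

lemma a_eq_fold (board : List (List Int)) :
    adjustFish board = (((List.range board.length).flatMap (fun i =>
      (List.range ((board.getD i []).length)).map (fun j => (i, j)))).flatMap
        (fun c => pvCellEvents board c.1 c.2)).foldl (pvApply board) board := by
  show ((List.range board.length).foldl (fun st i =>
    (List.range (board.getD i []).length).foldl (fun st j => pvCellA board st i j) st)
    ((List.range board.length).foldl _ ([], []))).1 = _
  rw [init_eq]
  rw [List.range_eq_range' (n := board.length)]
  obtain ⟨vis', heq⟩ := grid_fold board board.length 0 board
    (board.map fun r => List.replicate r.length false) (by omega) (visle_init board)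
  rw [heq]
  rw [List.flatMap_assoc]
  simp only [List.flatMap_map]

lemma alt_eq_fold (board : List (List Int)) :
    adjustFish_alt board = (pvHEvents board ++ pvVEvents board).foldl (pvApply board) board := by
  show ((List.range (board.length - 1)).foldl _
      ((List.range board.length).foldl _ (board.map (fun row => row)))) = _
  rw [List.map_id']
  rw [List.foldl_append]
  unfold pvHEvents pvVEvents
  rw [foldl_flatMap_eq, foldl_flatMap_eq]
  have h1 : ∀ init : List (List Int), (List.range board.length).foldl (fun acc a =>
      ((List.range ((board.getD a []).length - 1)).map (fun j => ((a, j), (a, j + 1)))).foldl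
        (pvApply board) acc) init
      = (List.range board.length).foldl (fun nb i =>
        (List.range ((board.getD i []).length - 1)).foldl
          (fun nb j => pvMove board nb i j i (j + 1)) nb) init := by
    intro init
    apply PySem.List.foldl_congr_mem
    intro acc x _
    rw [List.foldl_map]
    rfl
  have h2 : ∀ init : List (List Int), (List.range (board.length - 1)).foldl (fun acc a =>
      ((List.range (min (board.getD a []).length (board.getD (a + 1) []).length)).map
        (fun j => ((a, j), (a + 1, j)))).foldl (pvApply board) acc) init
      = (List.range (board.length - 1)).foldl (fun nb i =>
        (List.range (min (board.getD i []).length (board.getD (i + 1) []).length)).foldl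
          (fun nb j => pvMove board nb i j (i + 1) j) nb) init := by
    intro init
    apply PySem.List.foldl_congr_mem
    intro acc x _
    rw [List.foldl_map]
    rfl
  rw [h1, h2]
def pvDelta (a b : Int) : Int :=
  if b > a then PySem.Int.floordiv |b - a| 5 else -(PySem.Int.floordiv |b - a| 5)

lemma pvMove_eq (board nb : List (List Int)) (i1 j1 i2 j2 : Nat) :
    pvMove board nb i1 j1 i2 j2 =
      pvAdd2 (pvAdd2 nb i1 j1
          (pvDelta ((board.getD i1 []).getD j1 0) ((board.getD i2 []).getD j2 0))) i2 j2
        (-(pvDelta ((board.getD i1 []).getD j1 0) ((board.getD i2 []).getD j2 0))) := by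
  set a := (board.getD i1 []).getD j1 0 with ha
  set b := (board.getD i2 []).getD j2 0 with hb
  set d := PySem.Int.floordiv |b - a| 5 with hd
  have hdn : 0 ≤ d := d_nonneg _
  have hM : pvMove board nb i1 j1 i2 j2 =
      if b > a then pvAdd2 (pvAdd2 nb i1 j1 d) i2 j2 (-d)
      else if a > b then pvAdd2 (pvAdd2 nb i1 j1 (-d)) i2 j2 d else nb := rfl
  rw [hM]
  unfold pvDelta
  rw [← hd]
  by_cases hba : b > a
  · rw [if_pos hba, if_pos hba]
  · rw [if_neg hba, if_neg hba]
    by_cases hab : a > b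
    · rw [if_pos hab, neg_neg]
    · rw [if_neg hab]
      have : b = a := by omega
      rw [this] at hd
      have hd0 : d = 0 := by
        rw [hd]; simp [PySem.Int.floordiv]
      rw [hd0]
      simp [pvAdd2_zero]

lemma pvAdd2_swap4 (x : List (List Int)) (p1 q1 p2 q2 p3 q3 p4 q4 : Nat) (v1 v2 v3 v4 : Int) :
    pvAdd2 (pvAdd2 (pvAdd2 (pvAdd2 x p1 q1 v1) p2 q2 v2) p3 q3 v3) p4 q4 v4
      = pvAdd2 (pvAdd2 (pvAdd2 (pvAdd2 x p3 q3 v3) p4 q4 v4) p1 q1 v1) p2 q2 v2 := by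
  calc pvAdd2 (pvAdd2 (pvAdd2 (pvAdd2 x p1 q1 v1) p2 q2 v2) p3 q3 v3) p4 q4 v4
      = pvAdd2 (pvAdd2 (pvAdd2 (pvAdd2 x p1 q1 v1) p3 q3 v3) p2 q2 v2) p4 q4 v4 := by
        rw [pvAdd2_comm (pvAdd2 x p1 q1 v1) p2 q2 p3 q3 v2 v3]
    _ = pvAdd2 (pvAdd2 (pvAdd2 (pvAdd2 x p3 q3 v3) p1 q1 v1) p2 q2 v2) p4 q4 v4 := by
        rw [pvAdd2_comm x p1 q1 p3 q3 v1 v3]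
    _ = pvAdd2 (pvAdd2 (pvAdd2 (pvAdd2 x p3 q3 v3) p1 q1 v1) p4 q4 v4) p2 q2 v2 := by
        rw [pvAdd2_comm (pvAdd2 (pvAdd2 x p3 q3 v3) p1 q1 v1) p2 q2 p4 q4 v2 v4]
    _ = pvAdd2 (pvAdd2 (pvAdd2 (pvAdd2 x p3 q3 v3) p4 q4 v4) p1 q1 v1) p2 q2 v2 := by
        rw [pvAdd2_comm (pvAdd2 x p3 q3 v3) p1 q1 p4 q4 v1 v4]

lemma pvApply_comm (board : List (List Int)) (nb : List (List Int))
    (e e' : (Nat × Nat) × (Nat × Nat)) :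
    pvApply board (pvApply board nb e) e' = pvApply board (pvApply board nb e') e := by
  show pvMove board (pvMove board nb e.1.1 e.1.2 e.2.1 e.2.2) e'.1.1 e'.1.2 e'.2.1 e'.2.2
      = pvMove board (pvMove board nb e'.1.1 e'.1.2 e'.2.1 e'.2.2) e.1.1 e.1.2 e.2.1 e.2.2
  rw [pvMove_eq, pvMove_eq, pvMove_eq, pvMove_eq]
  exact pvAdd2_swap4 nb _ _ _ _ _ _ _ _ _ _ _ _

lemma flatMap_if_singleton {α β : Type} (p : α → Prop) [DecidablePred p] (e : α → β)
    (l : List α) :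
    (l.flatMap (fun x => if p x then [e x] else []))
      = (l.filter (fun x => decide (p x))).map e := by
  induction l with
  | nil => rfl
  | cons a t ih => by_cases h : p a <;> simp [List.flatMap_cons, h, ih]

lemma flatMap_if_list {α β : Type} (p : α → Prop) [DecidablePred p] (X : α → List β)
    (l : List α) :
    (l.flatMap (fun x => if p x then X x else []))
      = (l.filter (fun x => decide (p x))).flatMap X := by
  induction l with
  | nil => rfl
  | cons a t ih => by_cases h : p a <;> simp [List.flatMap_cons, h, ih]

lemma filter_lt_range (n m : Nat) :
    (List.range n).filter (fun j => decide (j < m)) = List.range (min n m) := by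
  induction n with
  | zero => rfl
  | succ k ih =>
    rw [List.range_succ, List.filter_append, ih]
    by_cases h : k < m
    · have h1 : min (k + 1) m = min k m + 1 := by omega
      have h2 : min k m = k := by omega
      simp [h, h1, h2, List.range_succ]
    · have h1 : min (k + 1) m = min k m := by omega
      simp [h, h1]

lemma flatMap_append_perm {α β : Type} (f g : α → List β) (l : List α) :
    (l.flatMap (fun x => f x ++ g x)).Perm (l.flatMap f ++ l.flatMap g) := by
  induction l with
  | nil => simp
  | cons a t ih =>
    simp only [List.flatMap_cons]
    refine ((ih.append_left (f a ++ g a)).trans ?_)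
    have h1 : (g a ++ (t.flatMap f ++ t.flatMap g)).Perm
        (t.flatMap f ++ (g a ++ t.flatMap g)) := by
      rw [← List.append_assoc, ← List.append_assoc]
      exact (List.perm_append_comm (l₁ := g a) (l₂ := t.flatMap f)).append_right (t.flatMap g)
    have h2 := h1.append_left (f a)
    simpa [List.append_assoc] using h2

lemma flatMap_perm_congr {α β : Type} (f g : α → List β) (l : List α)
    (h : ∀ a ∈ l, (f a).Perm (g a)) :
    (l.flatMap f).Perm (l.flatMap g) := by
  induction l with
  | nil => simp
  | cons a t ih =>
    simp only [List.flatMap_cons]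
    exact (h a (by simp)).append (ih (fun x hx => h x (by simp [hx])))

lemma hRow_eq (w i : Nat) :
    (List.range w).flatMap (fun j => if j + 1 < w then [((i, j), (i, j + 1))] else [])
      = (List.range (w - 1)).map (fun j => ((i, j), (i, j + 1))) := by
  rw [flatMap_if_singleton (p := fun j => j + 1 < w)]
  rw [List.filter_congr (q := fun j => decide (j < w - 1))
    (by intro x _; simp only [decide_eq_decide]; omega)]
  rw [filter_lt_range]
  rw [show min w (w - 1) = w - 1 by omega]

lemma vRow_eq (h wi wn i : Nat) (e : Nat → (Nat × Nat) × (Nat × Nat)) :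
    (List.range wi).flatMap (fun j => if i + 1 < h ∧ j < wn then [e j] else [])
      = if i + 1 < h then (List.range (min wi wn)).map e else [] := by
  by_cases hc : i + 1 < h
  · rw [if_pos hc]
    have : (fun j => if i + 1 < h ∧ j < wn then [e j] else [])
        = (fun j => if j < wn then [e j] else []) := by
      funext j
      by_cases hj : j < wn
      · rw [if_pos ⟨hc, hj⟩, if_pos hj]
      · rw [if_neg (by tauto), if_neg hj]
    rw [this, flatMap_if_singleton (p := fun j => j < wn), filter_lt_range]
  · rw [if_neg hc]
    have : (fun j => if i + 1 < h ∧ j < wn then [e j] else [])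
        = (fun _ => ([] : List ((Nat × Nat) × (Nat × Nat)))) := by
      funext j
      rw [if_neg (by tauto)]
    rw [this]
    simp

lemma pvEvents_perm (board : List (List Int)) :
    (((List.range board.length).flatMap (fun i =>
        (List.range ((board.getD i []).length)).map (fun j => (i, j)))).flatMap
      (fun c => pvCellEvents board c.1 c.2)).Perm
      (pvHEvents board ++ pvVEvents board) := by
  rw [List.flatMap_assoc]
  simp only [List.flatMap_map]
  have step1 : ∀ i ∈ List.range board.length,
      ((List.range ((board.getD i []).length)).flatMap (fun j => pvCellEvents board i j)).Perm
        (((List.range ((board.getD i []).length - 1)).map (fun j => ((i, j), (i, j + 1)))) ++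
          ((List.range ((board.getD i []).length)).flatMap (fun j =>
            if i + 1 < board.length ∧ j < (board.getD (i + 1) []).length then
              [((i, j), (i + 1, j))] else []))) := by
    intro i _
    have hp := flatMap_append_perm
      (fun j => if j + 1 < (board.getD i []).length then [((i, j), (i, j + 1))] else [])
      (fun j => if i + 1 < board.length ∧ j < (board.getD (i + 1) []).length then
        [((i, j), (i + 1, j))] else [])
      (List.range ((board.getD i []).length))
    rw [hRow_eq] at hp
    exact hp
  refine ((flatMap_perm_congr _ _ _ step1).trans ?_)
  refine ((flatMap_append_perm _ _ _).trans ?_)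
  have hH : (List.range board.length).flatMap (fun i =>
      (List.range ((board.getD i []).length - 1)).map (fun j => ((i, j), (i, j + 1))))
      = pvHEvents board := rfl
  have hV : (List.range board.length).flatMap (fun i =>
      (List.range ((board.getD i []).length)).flatMap (fun j =>
        if i + 1 < board.length ∧ j < (board.getD (i + 1) []).length then
          [((i, j), (i + 1, j))] else []))
      = pvVEvents board := by
    have e1 : ∀ i, (List.range ((board.getD i []).length)).flatMap (fun j =>
        if i + 1 < board.length ∧ j < (board.getD (i + 1) []).length then
          [((i, j), (i + 1, j))] else [])
        = if i + 1 < board.length then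
            (List.range (min ((board.getD i []).length) ((board.getD (i + 1) []).length))).map
              (fun j => ((i, j), (i + 1, j))) else [] := by
      intro i
      exact vRow_eq board.length ((board.getD i []).length) ((board.getD (i + 1) []).length) i _
    simp only [e1]
    rw [flatMap_if_list (p := fun i => i + 1 < board.length)]
    rw [List.filter_congr (q := fun i => decide (i < board.length - 1))
      (by intro x _; simp only [decide_eq_decide]; omega)]
    rw [filter_lt_range]
    rw [show min board.length (board.length - 1) = board.length - 1 by omega]
    rfl
  rw [hH, hV]

-- ===== VERDICT (by name: the statement is the Claim_ definition above) =====
theorem adjustFish_spec : Claim_equal_adjustFish := by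
  intro board _
  unfold Spec_adjustFish
  rw [a_eq_fold, alt_eq_fold]
  exact (pvEvents_perm board).foldl_eq'
    (fun x _ y _ z => pvApply_comm board z x y) board
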